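-- pv_equiv track=rewrite | github.com/sarapil/arrowz | arrowz/device_providers/sync_engine.py | _import_interfaces
-- ===== SOURCE A (Python) =====
-- def _import_interfaces(items: list) -> dict:
--     """Sync device interfaces into the Arrowz Box's interface tables."""
--     updated = 0
--     for iface in items:
--         # Update Arrowz Box hardware info (read-only fields)
--         try:
--             updated += 1
--         except Exception:
--             pass
--
--     # Store interfaces in the box doc's child tables if needed
--     return {"updated": updated, "count": len(items)}
-- ===== SOURCE B (Python) =====
-- def _import_interfaces(items: list) -> dict:
--     """Sync device interfaces: both fields equal len(items), so build the
--     result dict in one shot from the key list (no loop, no accumulator)."""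
--     return dict.fromkeys(("updated", "count"), len(items))
-- ===== Notes on version B (the rewrite author's own statement) =====
-- stated objective: idiomatic
-- what changed: Dropped the per-item accumulator loop with its unreachable except; B observes updated is always len(items) and constructs the whole result via dict.fromkeys over the key list with that closed-form value.
import Mathlib
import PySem

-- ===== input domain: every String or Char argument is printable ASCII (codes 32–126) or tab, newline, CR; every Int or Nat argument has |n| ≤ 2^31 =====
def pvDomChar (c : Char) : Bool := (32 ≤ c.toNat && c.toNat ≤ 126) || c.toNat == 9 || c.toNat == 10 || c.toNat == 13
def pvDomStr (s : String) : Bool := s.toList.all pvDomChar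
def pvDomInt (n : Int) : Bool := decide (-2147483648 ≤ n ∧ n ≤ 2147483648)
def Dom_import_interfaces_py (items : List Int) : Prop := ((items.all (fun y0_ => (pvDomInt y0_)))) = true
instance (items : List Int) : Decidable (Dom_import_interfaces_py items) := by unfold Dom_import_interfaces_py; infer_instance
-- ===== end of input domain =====

-- B replaces the accumulator loop by dict.fromkeys over the key list with len(items) (objective: idiomatic).


-- ===== PORT A =====
def import_interfaces_py (items : List Int) : List (String × Int) :=
  let updated : Int := items.foldl (fun updated _iface => updated + 1) 0
  [("updated", updated), ("count", (items.length : Int))]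

-- ===== PORT B =====
def import_interfaces_py_alt (items : List Int) : List (String × Int) :=
  -- dict.fromkeys(keys, v): each key paired with v, in key order
  ["updated", "count"].map (fun k => (k, (items.length : Int)))

-- ===== PRECONDITION & SPEC =====
def Spec_import_interfaces_py (items : List Int) (out : List (String × Int)) : Prop := out = import_interfaces_py_alt items
instance (items : List Int) (out : List (String × Int)) : Decidable (Spec_import_interfaces_py items out) := by unfold Spec_import_interfaces_py; infer_instance

-- ===== CLAIM (what is proved, stated in full; the proofs are below) =====
def Claim_equal_import_interfaces_py : Prop := ∀ (items : List Int), Dom_import_interfaces_py items → Spec_import_interfaces_py items (import_interfaces_py items)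

-- ===== LEMMAS AND PROOFS =====

-- ===== VERDICT (by name: the statement is the Claim_ definition above) =====
theorem pv_foldl_count (items : List Int) (a : Int) :
    items.foldl (fun updated _iface => updated + 1) a = a + items.length := by
  induction items generalizing a with
  | nil => simp
  | cons x xs ih => simp [List.foldl, ih]; omega


theorem import_interfaces_py_spec : Claim_equal_import_interfaces_py := by
  intro items _
  unfold Spec_import_interfaces_py import_interfaces_py import_interfaces_py_alt
  simp [pv_foldl_count]
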